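-- pv_equiv track=rewrite | github.com/sberbank-ai/DetIE | modules/model/apply.py | spans2triples
-- ===== SOURCE A (Python) =====
-- import string
--
-- def strip_bs(text: str) -> str:
--     """Removing punctuation and whitespace from bowth sides of the text"""
--     return text.strip(string.punctuation).strip()
--
-- def spans2triples(labels, text, offsets_mapping_item, tokens):
--     """
--         Labels to text
--     :param labels: NSRT = 0,1,2,3
--     :param text: a single paragraph
--     :param offsets_mapping_item: spans yielded by tokenizer
--     """
--
--     # let us believe the tokens of the same tag follow each other without breaks
--     result = [None, None, None, None]
--     prev_label = 0
--
--     for label, token, span in zip(labels, tokens, offsets_mapping_item):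
--
--         if token.startswith("##"):
--             label = prev_label
--
--         if result[label] is not None:
--             result[label] = (result[label][0], span[1])
--         else:
--             result[label] = span
--
--         prev_label = label
--
--     return [strip_bs(text[sp[0]: sp[1]]) if sp is not None else "" for sp in result[1:]]
-- ===== SOURCE B (Python) =====
-- import string
--
--
-- def strip_bs(text: str) -> str:
--     """Removing punctuation and whitespace from both sides of the text"""
--     return text.strip(string.punctuation).strip()
--
--
-- def spans2triples(labels, text, offsets_mapping_item, tokens):
--     # Resolve '##' continuation tokens: they inherit the previous label.
--     eff = []
--     prev = 0
--     for lab, tok in zip(labels, tokens):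
--         if tok.startswith("##"):
--             lab = prev
--         eff.append(lab)
--         prev = lab
--     # For each output slot 1..3, join the first start to the last end
--     # of the spans carrying that label, in order.
--     out = []
--     for k in (1, 2, 3):
--         spans = [sp for e, sp in zip(eff, offsets_mapping_item) if e == k]
--         out.append(strip_bs(text[spans[0][0]:spans[-1][1]]) if spans else "")
--     return out
-- ===== Notes on version B (the rewrite author's own statement) =====
-- stated objective: alternative
-- what changed: Replaces A's single stateful loop over a mutated 4-slot accumulator with two phases: one pass resolving '##'-continuation labels, then a per-slot scan taking the first start and last end of that slot's spans; Pre_ restricts labels to the documented NSRT range 0..3, outside which A either raises IndexError or silently wraps negative labels onto slots by Python negative indexing.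
-- outside the precondition, e.g. on spans2triples([-1], 'ab', [(0, 1)], ['a']): A returns ['', '', 'a'], B returns ['', '', '']; on spans2triples([5], 'ab', [(0, 1)], ['a']): A raises IndexError, B returns ['', '', '']
import Mathlib
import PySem

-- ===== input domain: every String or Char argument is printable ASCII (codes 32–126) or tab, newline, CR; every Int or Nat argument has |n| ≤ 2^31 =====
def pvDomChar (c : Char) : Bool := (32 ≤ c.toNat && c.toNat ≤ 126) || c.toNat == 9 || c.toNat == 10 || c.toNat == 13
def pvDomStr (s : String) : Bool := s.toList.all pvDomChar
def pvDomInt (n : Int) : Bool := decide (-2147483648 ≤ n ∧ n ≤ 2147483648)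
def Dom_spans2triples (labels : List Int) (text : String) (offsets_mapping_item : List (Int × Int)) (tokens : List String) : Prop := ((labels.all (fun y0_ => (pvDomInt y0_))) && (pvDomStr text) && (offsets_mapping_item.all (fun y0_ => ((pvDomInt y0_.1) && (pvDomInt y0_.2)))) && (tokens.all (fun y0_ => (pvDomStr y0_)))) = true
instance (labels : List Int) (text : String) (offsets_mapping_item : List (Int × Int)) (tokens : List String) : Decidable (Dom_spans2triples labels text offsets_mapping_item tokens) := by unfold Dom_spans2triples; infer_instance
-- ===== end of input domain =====

-- B resolves the '##'-continuation labels in one pass and then collects, per output slot,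
-- the first start and last end among that slot's offsets — replacing A's stateful 4-slot
-- accumulator with a per-slot scan (objective: alternative decomposition, same cost).

-- string.punctuation
def pvPunct : String := "!\"#$%&'()*+,-./:;<=>?@[\\]^_`{|}~"

-- strip_bs: text.strip(string.punctuation).strip()
def stripBs (t : String) : String := PySem.Str.strip (PySem.Str.stripChars t pvPunct)

-- ===== PORT A =====
-- the for-loop over zip(labels, tokens, offsets): state = (result, prev_label);
-- none = IndexError (result[label] out of range)
def aLoop : List (Int × String × (Int × Int)) → List (Option (Int × Int)) → Int →
    Option (List (Option (Int × Int)))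
  | [], res, _ => some res
  | (label, token, span) :: rest, res, prev =>
    let label' := if PySem.Str.startswith token "##" then prev else label
    match PySem.List.pyGet? res label' with
    | none => none
    | some cur =>
      let entry : Option (Int × Int) :=
        match cur with
        | some p => some (p.1, span.2)
        | none => some span
      match PySem.List.pySet? res label' entry with
      | none => none
      | some res' => aLoop rest res' label'

def spans2triples (labels : List Int) (text : String) (offsets_mapping_item : List (Int × Int)) (tokens : List String) : List String :=
  match aLoop (labels.zip (tokens.zip offsets_mapping_item)) [none, none, none, none] 0 with
  | none => []   -- unreachable under Pre_ (A raises IndexError here)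
  | some res =>
    (PySem.List.slice res (some 1) none).map fun sp =>
      match sp with
      | some p => stripBs (PySem.Str.slice text (some p.1) (some p.2))
      | none => ""

-- ===== PORT B =====
-- Phase 1: effective labels ('##' continuation tokens inherit the previous label)
def effLabels : List (Int × String) → Int → List Int
  | [], _ => []
  | (lab, tok) :: rest, prev =>
    let lab' := if PySem.Str.startswith tok "##" then prev else lab
    lab' :: effLabels rest lab'

def spans2triples_alt (labels : List Int) (text : String) (offsets_mapping_item : List (Int × Int)) (tokens : List String) : List String :=
  let eff := effLabels (labels.zip tokens) 0
  ([1, 2, 3] : List Int).map fun k =>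
    let spans := ((eff.zip offsets_mapping_item).filter (fun p => p.1 == k)).map Prod.snd
    match spans with
    | [] => ""
    | s0 :: rest =>
      stripBs (PySem.Str.slice text (some s0.1)
        (some (((s0 :: rest).getLast (List.cons_ne_nil _ _)).2)))

-- ===== PRECONDITION & SPEC =====
-- Pre_ restricts labels to the documented NSRT range 0..3 (at non-'##' tokens within the
-- zipped length): outside it A either raises IndexError (label < -4 or > 3) or silently
-- wraps negative labels onto slots by Python negative indexing (-4..-1), which is outside
-- the task's natural domain.
def Pre_spans2triples (labels : List Int) (text : String) (offsets_mapping_item : List (Int × Int)) (tokens : List String) : Prop :=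
  ∀ p ∈ labels.zip (tokens.zip offsets_mapping_item),
    PySem.Str.startswith p.2.1 "##" = false → 0 ≤ p.1 ∧ p.1 ≤ 3
instance (labels : List Int) (text : String) (offsets_mapping_item : List (Int × Int)) (tokens : List String) : Decidable (Pre_spans2triples labels text offsets_mapping_item tokens) := by unfold Pre_spans2triples; infer_instance

def pvWitness_spans2triples : List Int × String × (List (Int × Int)) × List String :=
  ([1, 1, 2, 3], "He is tall.", [(0, 2), (3, 5), (3, 5), (6, 10)], ["He", "##y", "is", "tall"])

def Spec_spans2triples (labels : List Int) (text : String) (offsets_mapping_item : List (Int × Int)) (tokens : List String) (out : List String) : Prop := out = spans2triples_alt labels text offsets_mapping_item tokens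
instance (labels : List Int) (text : String) (offsets_mapping_item : List (Int × Int)) (tokens : List String) (out : List String) : Decidable (Spec_spans2triples labels text offsets_mapping_item tokens out) := by unfold Spec_spans2triples; infer_instance

-- ===== CLAIM (what is proved, stated in full; the proofs are below) =====
def Claim_equal_spans2triples : Prop := ∀ (labels : List Int) (text : String) (offsets_mapping_item : List (Int × Int)) (tokens : List String), Dom_spans2triples labels text offsets_mapping_item tokens → Pre_spans2triples labels text offsets_mapping_item tokens → Spec_spans2triples labels text offsets_mapping_item tokens (spans2triples labels text offsets_mapping_item tokens)

-- ===== LEMMAS AND PROOFS =====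

-- eff-labels threaded through the triple list (proof-side reformulation of B's two zips)
def effZip : List (Int × String × (Int × Int)) → Int → List (Int × (Int × Int))
  | [], _ => []
  | (lab, tok, span) :: rest, prev =>
    let lab' := if PySem.Str.startswith tok "##" then prev else lab
    (lab', span) :: effZip rest lab'

-- final value of one slot after appending a span list to an initial slot value
def slotVal (init : Option (Int × Int)) (spans : List (Int × Int)) : Option (Int × Int) :=
  match spans with
  | [] => init
  | s0 :: rest =>
    some (((init.map Prod.fst).getD s0.1), ((s0 :: rest).getLast (List.cons_ne_nil _ _)).2)

def spOf (trips : List (Int × String × (Int × Int))) (prev : Int) (j : Int) : List (Int × Int) :=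
  ((effZip trips prev).filter (fun p => p.1 == j)).map Prod.snd

lemma slotVal_cons (init : Option (Int × Int)) (s : Int × Int) (l : List (Int × Int)) :
    slotVal init (s :: l) = slotVal (some (((init.map Prod.fst).getD s.1), s.2)) l := by
  cases l <;> simp [slotVal]

lemma entry_eq (r : Option (Int × Int)) (span : Int × Int) :
    (match r with
      | some p => some (p.1, span.2)
      | none => some span) = some ((r.getD span).1, span.2) := by
  cases r <;> rfl

lemma zip_effLabels (labels : List Int) (tokens : List String)
    (offs : List (Int × Int)) (prev : Int) :
    (effLabels (labels.zip tokens) prev).zip offs =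
      effZip (labels.zip (tokens.zip offs)) prev := by
  induction labels generalizing tokens offs prev with
  | nil => simp [effLabels, effZip]
  | cons l ls ih =>
    cases tokens with
    | nil => simp [effLabels, effZip]
    | cons t ts =>
      cases offs with
      | nil => simp [effLabels, effZip]
      | cons o os => simp [effLabels, effZip, ih]

lemma aLoop_eq (trips : List (Int × String × (Int × Int))) (prev : Int)
    (r0 r1 r2 r3 : Option (Int × Int))
    (hp1 : 0 ≤ prev) (hp2 : prev ≤ 3)
    (hpre : ∀ p ∈ trips, PySem.Str.startswith p.2.1 "##" = false → 0 ≤ p.1 ∧ p.1 ≤ 3) :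
    aLoop trips [r0, r1, r2, r3] prev =
      some [slotVal r0 (spOf trips prev 0), slotVal r1 (spOf trips prev 1),
            slotVal r2 (spOf trips prev 2), slotVal r3 (spOf trips prev 3)] := by
  induction trips generalizing prev r0 r1 r2 r3 with
  | nil => simp [aLoop, spOf, effZip, slotVal]
  | cons hd rest ih =>
    obtain ⟨lab, tok, span⟩ := hd
    have hrest : ∀ p ∈ rest, PySem.Str.startswith p.2.1 "##" = false → 0 ≤ p.1 ∧ p.1 ≤ 3 :=
      fun p hp => hpre p (List.mem_cons_of_mem _ hp)
    by_cases hsw : PySem.Str.startswith tok "##" = true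
    · -- label' = prev
      have hsw2 : PySem.Chars.startswith tok.toList ['#', '#'] = true := by simpa using hsw
      interval_cases prev <;>
        · simp [aLoop, hsw2, spOf, effZip, PySem.List.pyGet?, PySem.List.pySet?,
                PySem.List.pyIdx?, slotVal_cons, entry_eq]
          exact ih _ _ _ _ _ (by norm_num) (by norm_num) hrest
    · have hsw' : PySem.Str.startswith tok "##" = false := by
        simpa using hsw
      have hsw2 : PySem.Chars.startswith tok.toList ['#', '#'] = false := by simpa using hsw'
      have h4 : 0 ≤ lab ∧ lab ≤ 3 := hpre _ (List.mem_cons_self) hsw'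
      obtain ⟨hl, hr⟩ := h4
      interval_cases lab <;>
        · simp [aLoop, hsw2, spOf, effZip, PySem.List.pyGet?, PySem.List.pySet?,
                PySem.List.pyIdx?, slotVal_cons, entry_eq]
          exact ih _ _ _ _ _ (by norm_num) (by norm_num) hrest

lemma slot_render (text : String) (spans : List (Int × Int)) :
    (match spans with
      | [] => ""
      | s0 :: rest =>
        stripBs (PySem.Str.slice text (some s0.1)
          (some (((s0 :: rest).getLast (List.cons_ne_nil _ _)).2)))) =
    (match slotVal none spans with
      | some p => stripBs (PySem.Str.slice text (some p.1) (some p.2))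
      | none => "") := by
  cases spans with
  | nil => simp [slotVal]
  | cons s0 rest => simp [slotVal]

-- ===== VERDICT (by name: the statement is the Claim_ definition above) =====
theorem spans2triples_spec : Claim_equal_spans2triples := by
  intro labels text offs tokens _ hpre
  unfold Spec_spans2triples spans2triples spans2triples_alt
  rw [aLoop_eq _ 0 none none none none (by norm_num) (by norm_num) hpre]
  simp only [zip_effLabels]
  rw [show ∀ (a b c d : Option (Int × Int)), PySem.List.slice [a, b, c, d] (some 1) none = [b, c, d] from fun _ _ _ _ => rfl]
  simp [spOf, slot_render]
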